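-- pv_equiv track=rewrite | github.com/nobelleprize/leetcode | google/1007-min-domino-rotation.py | check
-- ===== SOURCE A (Python) =====
-- def check(tops, bottoms, x, n):
--     rotations_a = 0
--     rotations_b = 0
--
--     for i in range(n):
--         if tops[i] != x and bottoms[i] != x:
--             return -1
--         elif tops[i] != x:
--             rotations_a += 1
--         elif bottoms[i] != x:
--             rotations_b += 1
--
--     return min(rotations_a, rotations_b)
-- ===== SOURCE B (Python) =====
-- def check(tops, bottoms, x, n):
--     if any(tops[i] != x and bottoms[i] != x for i in range(n)):
--         return -1
--     return min(sum(1 for i in range(n) if tops[i] != x),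
--                sum(1 for i in range(n) if bottoms[i] != x))
-- ===== Notes on version B (the rewrite author's own statement) =====
-- stated objective: simpler
-- what changed: Replaces A's single fused loop with intertwined elif counters by a short-circuiting validation pass (any) followed by two independent counting passes over range(n).
import Mathlib
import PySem

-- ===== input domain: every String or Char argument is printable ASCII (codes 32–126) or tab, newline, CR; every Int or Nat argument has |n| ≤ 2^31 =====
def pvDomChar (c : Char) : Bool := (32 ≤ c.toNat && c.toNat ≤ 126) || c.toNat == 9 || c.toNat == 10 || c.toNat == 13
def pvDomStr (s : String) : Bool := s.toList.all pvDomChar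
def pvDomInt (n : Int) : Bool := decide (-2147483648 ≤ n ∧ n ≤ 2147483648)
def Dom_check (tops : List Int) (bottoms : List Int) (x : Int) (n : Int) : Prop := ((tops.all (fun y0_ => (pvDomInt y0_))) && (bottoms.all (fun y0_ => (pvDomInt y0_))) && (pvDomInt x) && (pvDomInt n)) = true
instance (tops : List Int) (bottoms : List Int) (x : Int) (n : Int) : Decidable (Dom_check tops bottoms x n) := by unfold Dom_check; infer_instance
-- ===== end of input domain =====

-- B: a separate short-circuiting validation pass plus two independent counting passes
-- instead of A's fused loop with intertwined elif counters (objective: simpler).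

-- ===== PORT A =====
-- the for-loop over range(n) with early 'return -1' and the two counters
def checkGo (tops : List Int) (bottoms : List Int) (x : Int) (n : Int)
    (i : Int) (ra : Int) (rb : Int) : Int :=
  if h : i < n then
    match PySem.List.pyGet? tops i, PySem.List.pyGet? bottoms i with
    | some t, some b =>
      if t ≠ x ∧ b ≠ x then -1
      else if t ≠ x then checkGo tops bottoms x n (i + 1) (ra + 1) rb
      else if b ≠ x then checkGo tops bottoms x n (i + 1) ra (rb + 1)
      else checkGo tops bottoms x n (i + 1) ra rb
    | _, _ => 0  -- IndexError in Python; excluded by Pre_check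
  else min ra rb
termination_by (n - i).toNat
decreasing_by all_goals (simp at h ⊢; omega)

def check (tops : List Int) (bottoms : List Int) (x : Int) (n : Int) : Int :=
  checkGo tops bottoms x n 0 0 0

-- ===== PORT B =====
-- 'any(tops[i] != x and bottoms[i] != x for i in range(n))', short-circuiting as in Python
def altAny (tops : List Int) (bottoms : List Int) (x : Int) (n : Int) (i : Int) : Bool :=
  if h : i < n then
    if PySem.List.pyGetD tops i 0 ≠ x ∧ PySem.List.pyGetD bottoms i 0 ≠ x then true
    else altAny tops bottoms x n (i + 1)
  else false
termination_by (n - i).toNat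
decreasing_by simp at h ⊢; omega

-- 'sum(1 for i in range(n) if xs[i] != x)'
def altCount (xs : List Int) (x : Int) (n : Int) (i : Int) (acc : Int) : Int :=
  if h : i < n then
    altCount xs x n (i + 1) (acc + if PySem.List.pyGetD xs i 0 ≠ x then 1 else 0)
  else acc
termination_by (n - i).toNat
decreasing_by simp at h ⊢; omega

def check_alt (tops : List Int) (bottoms : List Int) (x : Int) (n : Int) : Int :=
  if altAny tops bottoms x n 0 then -1
  else min (altCount tops x n 0 0) (altCount bottoms x n 0 0)

-- ===== PRECONDITION & SPEC =====
-- Pre_: A raises IndexError when range(n) reaches an index past either list's end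
-- before hitting an invalid column; kept are the in-bounds inputs and those where an
-- invalid column (both sides ≠ x) occurs at a valid index below n, where A returns -1.
def Pre_check (tops : List Int) (bottoms : List Int) (x : Int) (n : Int) : Prop :=
  (n ≤ (tops.length : Int) ∧ n ≤ (bottoms.length : Int)) ∨
  (∃ i ∈ List.range (min tops.length bottoms.length), ((i : Int)) < n ∧
      PySem.List.pyGetD tops (i : Int) 0 ≠ x ∧ PySem.List.pyGetD bottoms (i : Int) 0 ≠ x)
instance (tops : List Int) (bottoms : List Int) (x : Int) (n : Int) : Decidable (Pre_check tops bottoms x n) := by unfold Pre_check; infer_instance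

def pvWitness_check : List Int × List Int × Int × Int := ([2, 1, 2], [1, 2, 2], 2, 3)

def Spec_check (tops : List Int) (bottoms : List Int) (x : Int) (n : Int) (out : Int) : Prop := out = check_alt tops bottoms x n
instance (tops : List Int) (bottoms : List Int) (x : Int) (n : Int) (out : Int) : Decidable (Spec_check tops bottoms x n out) := by unfold Spec_check; infer_instance

-- ===== CLAIM (what is proved, stated in full; the proofs are below) =====
def Claim_equal_check : Prop := ∀ (tops : List Int) (bottoms : List Int) (x : Int) (n : Int), Dom_check tops bottoms x n → Pre_check tops bottoms x n → Spec_check tops bottoms x n (check tops bottoms x n)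

-- ===== LEMMAS AND PROOFS =====

-- list-indexed restatements of the three loops, used only in the proofs
def checkGoL (tops : List Int) (bottoms : List Int) (x : Int) :
    List Int → Int → Int → Int
  | [], ra, rb => min ra rb
  | i :: rest, ra, rb =>
    match PySem.List.pyGet? tops i, PySem.List.pyGet? bottoms i with
    | some t, some b =>
      if t ≠ x ∧ b ≠ x then -1
      else if t ≠ x then checkGoL tops bottoms x rest (ra + 1) rb
      else if b ≠ x then checkGoL tops bottoms x rest ra (rb + 1)
      else checkGoL tops bottoms x rest ra rb
    | _, _ => 0

theorem checkGo_eq_list (tops bottoms : List Int) (x n : Int) :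
    ∀ (i ra rb : Int), checkGo tops bottoms x n i ra rb =
      checkGoL tops bottoms x (PySem.List.pyRange i n 1) ra rb := by
  intro i ra rb
  fun_induction checkGo tops bottoms x n i ra rb with
  | case1 i ra rb h t b htg hbg hbad =>
    rw [PySem.List.pyRange_one_cons h]; simp [checkGoL, htg, hbg, hbad]
  | case2 i ra rb h t b htg hbg hbad ht ih =>
    rw [PySem.List.pyRange_one_cons h]
    simp [checkGoL, htg, hbg, ht, ih]
    intro hbx
    exact absurd ⟨ht, hbx⟩ hbad
  | case3 i ra rb h t b htg hbg hbad ht hb ih =>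
    rw [PySem.List.pyRange_one_cons h]; simp [checkGoL, htg, hbg, ht, hb, ih]
  | case4 i ra rb h t b htg hbg hbad ht hb ih =>
    rw [PySem.List.pyRange_one_cons h]; simp [checkGoL, htg, hbg, ht, hb, ih]
  | case5 i ra rb h hmatch =>
    rw [PySem.List.pyRange_one_cons h]
    cases htg : PySem.List.pyGet? tops i <;> cases hbg : PySem.List.pyGet? bottoms i <;>
      first
        | (exact absurd (hmatch _ _ htg hbg) (by simp))
        | simp [checkGoL, htg, hbg]
  | case6 i ra rb h =>
    rw [PySem.List.pyRange_one_eq_nil (by omega)]; simp [checkGoL]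

theorem altAny_eq_list (tops bottoms : List Int) (x n : Int) :
    ∀ i : Int, altAny tops bottoms x n i =
      (PySem.List.pyRange i n 1).any
        (fun j => decide (PySem.List.pyGetD tops j 0 ≠ x) && decide (PySem.List.pyGetD bottoms j 0 ≠ x)) := by
  intro i
  fun_induction altAny tops bottoms x n i with
  | case1 i h hbad => rw [PySem.List.pyRange_one_cons h]; simp [hbad.1, hbad.2]
  | case2 i h hbad ih =>
    rw [PySem.List.pyRange_one_cons h]
    simp only [List.any_cons, ih]
    rcases not_and_or.mp hbad with h1 | h1 <;> simp at h1 <;> simp [h1]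
  | case3 i h => rw [PySem.List.pyRange_one_eq_nil (by omega)]; simp

theorem altCount_eq_list (xs : List Int) (x n : Int) :
    ∀ (i acc : Int), altCount xs x n i acc =
      acc + ((PySem.List.pyRange i n 1).countP (fun j => decide (PySem.List.pyGetD xs j 0 ≠ x)) : Int) := by
  intro i acc
  fun_induction altCount xs x n i acc with
  | case1 i acc h ih =>
    rw [PySem.List.pyRange_one_cons h] at *
    simp only [List.countP_cons]
    split <;> simp_all <;> push_cast <;> omega
  | case2 i acc h => rw [PySem.List.pyRange_one_eq_nil (by omega)]; simp

-- on a list of valid indices, A's loop equals "any invalid column? -1 : min of counts"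
theorem checkGoL_valid (tops bottoms : List Int) (x : Int) (is : List Int)
    (h : ∀ j ∈ is, 0 ≤ j ∧ j < (tops.length : Int) ∧ j < (bottoms.length : Int)) :
    ∀ ra rb : Int,
      checkGoL tops bottoms x is ra rb =
        if is.any (fun i => decide (PySem.List.pyGetD tops i 0 ≠ x) && decide (PySem.List.pyGetD bottoms i 0 ≠ x)) then -1
        else min (ra + (is.countP (fun i => decide (PySem.List.pyGetD tops i 0 ≠ x)) : Int))
                 (rb + (is.countP (fun i => decide (PySem.List.pyGetD bottoms i 0 ≠ x)) : Int)) := by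
  induction is with
  | nil => intro ra rb; simp [checkGoL]
  | cons i rest ih =>
    intro ra rb
    obtain ⟨h0, ht, hb⟩ := h i (List.mem_cons_self)
    have hrest := fun j hj => h j (List.mem_cons_of_mem _ hj)
    have htg : PySem.List.pyGet? tops i = some (PySem.List.pyGetD tops i 0) := by
      rw [PySem.List.pyGet?_eq_some_getElem tops h0 ht, PySem.List.pyGetD_eq_getElem tops 0 h0 ht]
    have hbg : PySem.List.pyGet? bottoms i = some (PySem.List.pyGetD bottoms i 0) := by
      rw [PySem.List.pyGet?_eq_some_getElem bottoms h0 hb, PySem.List.pyGetD_eq_getElem bottoms 0 h0 hb]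
    by_cases hT : PySem.List.pyGetD tops i 0 = x <;>
      by_cases hB : PySem.List.pyGetD bottoms i 0 = x <;>
        simp [checkGoL, htg, hbg, hT, hB, ih hrest] <;>
          split <;> push_cast <;> omega

-- if some valid invalid-column index occurs in a strictly increasing list of
-- nonnegative indices, A's loop returns -1
theorem checkGoL_bad (tops bottoms : List Int) (x : Int) (is : List Int)
    (hsort : is.Pairwise (· < ·)) (hnn : ∀ j ∈ is, 0 ≤ j)
    (hi : ∃ i ∈ is, i < (tops.length : Int) ∧ i < (bottoms.length : Int) ∧
        PySem.List.pyGetD tops i 0 ≠ x ∧ PySem.List.pyGetD bottoms i 0 ≠ x) :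
    ∀ ra rb : Int, checkGoL tops bottoms x is ra rb = -1 := by
  induction is with
  | nil => simp at hi
  | cons i0 rest ih =>
    intro ra rb
    obtain ⟨i, hmem, hit, hib, hTx, hBx⟩ := hi
    have h00 : (0:Int) ≤ i0 := hnn i0 (List.mem_cons_self)
    have hlt : ∀ j ∈ rest, i0 < j := (List.pairwise_cons.mp hsort).1
    have hi0t : i0 < (tops.length : Int) := by
      rcases List.mem_cons.mp hmem with h | h
      · omega
      · have := hlt i h; omega
    have hi0b : i0 < (bottoms.length : Int) := by
      rcases List.mem_cons.mp hmem with h | h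
      · omega
      · have := hlt i h; omega
    have htg : PySem.List.pyGet? tops i0 = some (PySem.List.pyGetD tops i0 0) := by
      rw [PySem.List.pyGet?_eq_some_getElem tops h00 hi0t, PySem.List.pyGetD_eq_getElem tops 0 h00 hi0t]
    have hbg : PySem.List.pyGet? bottoms i0 = some (PySem.List.pyGetD bottoms i0 0) := by
      rw [PySem.List.pyGet?_eq_some_getElem bottoms h00 hi0b, PySem.List.pyGetD_eq_getElem bottoms 0 h00 hi0b]
    by_cases hbad : PySem.List.pyGetD tops i0 0 ≠ x ∧ PySem.List.pyGetD bottoms i0 0 ≠ x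
    · simp [checkGoL, htg, hbg, hbad]
    · have hir : i ∈ rest := by
        rcases List.mem_cons.mp hmem with h | h
        · exact absurd (h ▸ ⟨hTx, hBx⟩) hbad
        · exact h
      have ih' := ih ((List.pairwise_cons.mp hsort).2)
        (fun j hj => hnn j (List.mem_cons_of_mem _ hj))
        ⟨i, hir, hit, hib, hTx, hBx⟩
      by_cases hT : PySem.List.pyGetD tops i0 0 = x <;>
        by_cases hB : PySem.List.pyGetD bottoms i0 0 = x <;>
          simp_all [checkGoL]

-- ===== VERDICT (by name: the statement is the Claim_ definition above) =====
theorem check_spec : Claim_equal_check := by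
  intro tops bottoms x n _ hpre
  unfold Spec_check check check_alt
  rw [checkGo_eq_list, altAny_eq_list, altCount_eq_list, altCount_eq_list]
  rcases hpre with ⟨hnt, hnb⟩ | ⟨i, hiR, hn, hTx, hBx⟩
  · have hval : ∀ j ∈ PySem.List.pyRange 0 n 1,
        0 ≤ j ∧ j < (tops.length : Int) ∧ j < (bottoms.length : Int) := by
      intro j hj
      have := PySem.List.mem_pyRange_one.mp hj
      omega
    rw [checkGoL_valid tops bottoms x _ hval 0 0]
  · have hilt : i < min tops.length bottoms.length := List.mem_range.mp hiR
    have hmem : (i : Int) ∈ PySem.List.pyRange 0 n 1 :=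
      PySem.List.mem_pyRange_one.mpr ⟨Int.natCast_nonneg i, hn⟩
    have hit : (i : Int) < (tops.length : Int) := by omega
    have hib : (i : Int) < (bottoms.length : Int) := by omega
    have hnn : ∀ j ∈ PySem.List.pyRange 0 n 1, (0:Int) ≤ j := by
      intro j hj
      exact (PySem.List.mem_pyRange_one.mp hj).1
    rw [checkGoL_bad tops bottoms x _ (PySem.List.pairwise_lt_pyRange_one 0 n) hnn
        ⟨(i : Int), hmem, hit, hib, hTx, hBx⟩ 0 0]
    simp
    intro hall
    exact absurd (hall (i : Int) (Int.natCast_nonneg i) hn hTx) hBx
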